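-- pv_equiv track=rewrite | github.com/BUT-RT-Info/Referentiels | python/rpn/latex.py | ajoute_abbr_latex
-- ===== SOURCE A (Python) =====
-- def ajoute_abbr_latex(chaine, DATA_ABBREVIATIONS):
--     """
--     Parse la ``chaine`` latex pour ajouter les abréviations décrites dans le dictionnaire
--     ``DATA_ABBREVIATIONS`` et les remplacer par
--     le balisage latex ``\\textabbrv{abreviation}``
--     """
--     mots = chaine.split(" ")
--     for (i, mot) in enumerate(mots):
--         abbrs = contient_abbr(mot, DATA_ABBREVIATIONS)
--         if abbrs:
--             mots[i] = mots[i].replace(abbrs[0], "\\textabbrv{" + abbrs[0] + "}")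
--     chaine = " ".join(mots)
--     if "/IP" in chaine:
--         chaine = chaine.replace("/IP", "/\\textabbrv{IP}")
--     return chaine
--
-- def contient_abbr(chaine, DATA_ABBREVIATIONS):
--     """Détecte les abréviations présentes dans la ``chaine`` et présentes dans le dictionnaire
--     ``DATA_ABBREVIATIONS`` et les renvoie sous forme d'une liste d'abréviations triée
--     par nombre de caractères décroissants"""
--     mots = []
--     for lettre in DATA_ABBREVIATIONS:
--         for mot in DATA_ABBREVIATIONS[lettre]:
--             if mot in chaine:
--                 mots.append(mot)
--     mots = sorted(
--         mots, key=lambda m: len(m), reverse=True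
--     )  # les mots triés par nbre de carac décroissant
--     return mots
-- ===== SOURCE B (Python) =====
-- def ajoute_abbr_latex(chaine, DATA_ABBREVIATIONS):
--     """
--     Same task as A, restructured: flatten the abbreviation dictionary once, then a
--     single pass per word keeps the longest (earliest on ties) matching abbreviation
--     directly - no per-word match list, no sort; the final /IP replace is unconditional.
--     """
--     abbrevs = [m for lst in DATA_ABBREVIATIONS.values() for m in lst]
--     mots = []
--     for mot in chaine.split(" "):
--         best = None
--         for m in abbrevs:
--             if m in mot and (best is None or len(m) > len(best)):
--                 best = m
--         mots.append(mot if best is None else mot.replace(best, "\\textabbrv{" + best + "}"))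
--     return " ".join(mots).replace("/IP", "/\\textabbrv{IP}")
-- ===== Notes on version B (the rewrite author's own statement) =====
-- stated objective: alternative
-- what changed: Per word, A collects every matching abbreviation by re-scanning the whole dictionary, sorts the matches by length descending and takes the first; B flattens the dictionary once and does a single pass per word keeping the longest (earliest on ties) match directly, with no per-word match list and no sort, and applies the final /IP replacement unconditionally.
import Mathlib
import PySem

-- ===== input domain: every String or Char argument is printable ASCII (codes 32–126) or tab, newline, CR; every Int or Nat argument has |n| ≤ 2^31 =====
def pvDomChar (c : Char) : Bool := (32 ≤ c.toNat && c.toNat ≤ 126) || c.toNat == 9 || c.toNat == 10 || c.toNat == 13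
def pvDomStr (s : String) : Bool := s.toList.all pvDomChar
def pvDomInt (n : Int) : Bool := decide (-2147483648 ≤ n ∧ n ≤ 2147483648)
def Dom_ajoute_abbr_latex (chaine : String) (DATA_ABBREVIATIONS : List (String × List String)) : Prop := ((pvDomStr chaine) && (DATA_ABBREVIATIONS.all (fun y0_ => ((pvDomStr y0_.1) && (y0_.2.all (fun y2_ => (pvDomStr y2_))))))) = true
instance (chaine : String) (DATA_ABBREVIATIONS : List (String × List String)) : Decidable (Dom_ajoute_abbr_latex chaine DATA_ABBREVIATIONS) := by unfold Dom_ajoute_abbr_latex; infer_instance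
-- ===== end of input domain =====

-- B replaces A's per-word "collect every matching abbreviation, sort by length, take the first"
-- with a flatten-once + single-pass longest-match scan per word (objective: alternative).

-- ===== PORT A =====
-- helper: contient_abbr(chaine, DATA_ABBREVIATIONS) — collects all abbreviations occurring in
-- `chaine` (dict iteration order) and sorts them by length, descending (stable).
def contient_abbr (chaine : String) (d : PySem.Dict String (List String)) : List String :=
  let mots : List String :=
    d.keys.foldl (fun acc lettre =>
      (d.getD lettre []).foldl (fun acc mot =>
        if PySem.Str.isIn mot chaine then acc ++ [mot] else acc) acc) []
  PySem.List.sorted mots (fun m => PySem.Str.len m) true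

def ajoute_abbr_latex (chaine : String) (DATA_ABBREVIATIONS : List (String × List String)) : String :=
  let d := PySem.Dict.ofList DATA_ABBREVIATIONS
  let mots := (PySem.Str.split? chaine " ").getD []
  -- the enumerate-and-update loop: each word is rewritten independently
  let mots := mots.map (fun mot =>
    let abbrs := contient_abbr mot d
    match abbrs with
    | [] => mot
    | a :: _ => PySem.Str.replace mot a ("\\textabbrv{" ++ a ++ "}"))
  let chaine := PySem.Str.join " " mots
  if PySem.Str.isIn "/IP" chaine then PySem.Str.replace chaine "/IP" "/\\textabbrv{IP}"
  else chaine

-- ===== PORT B =====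
def ajoute_abbr_latex_alt (chaine : String) (DATA_ABBREVIATIONS : List (String × List String)) : String :=
  let abbrevs := ((PySem.Dict.ofList DATA_ABBREVIATIONS).values).flatMap (fun lst => lst)
  let mark := fun (mot : String) =>
    let best := abbrevs.foldl (fun best m =>
      if PySem.Str.isIn m mot &&
         (match best with
          | none => true
          | some b => decide (PySem.Str.len b < PySem.Str.len m))
      then some m else best) none
    match best with
    | none => mot
    | some b => PySem.Str.replace mot b ("\\textabbrv{" ++ b ++ "}")
  PySem.Str.replace (PySem.Str.join " " (((PySem.Str.split? chaine " ").getD []).map mark))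
    "/IP" "/\\textabbrv{IP}"

-- ===== PRECONDITION & SPEC =====
def Spec_ajoute_abbr_latex (chaine : String) (DATA_ABBREVIATIONS : List (String × List String)) (out : String) : Prop := out = ajoute_abbr_latex_alt chaine DATA_ABBREVIATIONS
instance (chaine : String) (DATA_ABBREVIATIONS : List (String × List String)) (out : String) : Decidable (Spec_ajoute_abbr_latex chaine DATA_ABBREVIATIONS out) := by unfold Spec_ajoute_abbr_latex; infer_instance

-- ===== CLAIM (what is proved, stated in full; the proofs are below) =====
def Claim_equal_ajoute_abbr_latex : Prop := ∀ (chaine : String) (DATA_ABBREVIATIONS : List (String × List String)), Dom_ajoute_abbr_latex chaine DATA_ABBREVIATIONS → Spec_ajoute_abbr_latex chaine DATA_ABBREVIATIONS (ajoute_abbr_latex chaine DATA_ABBREVIATIONS)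

-- ===== LEMMAS AND PROOFS =====

-- replace is the identity when the pattern does not occur (go-level invariant)
lemma replace_go_of_not_infix (old new : List Char) :
    ∀ (l acc : List Char), old ≠ [] → ¬ old <:+: l →
      PySem.Chars.replace.go old new l.length l acc = acc.reverse ++ l := by
  intro l
  induction l with
  | nil => intro acc _ _; simp [PySem.Chars.replace.go]
  | cons c t ih =>
      intro acc hne hinf
      have hpre : old.isPrefixOf (c :: t) = false := by
        rw [← Bool.not_eq_true, List.isPrefixOf_iff_prefix]
        exact fun h => hinf h.isInfix
      have hint : ¬ old <:+: t := fun h => hinf (h.trans (List.suffix_cons c t).isInfix)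
      simp only [List.length_cons, PySem.Chars.replace.go, hpre]
      rw [ih (c :: acc) hne hint]
      simp

lemma chars_replace_of_not_isIn (s old new : List Char) (h : PySem.Chars.isIn old s = false) :
    PySem.Chars.replace s old new = s := by
  have hinf : ¬ old <:+: s := (PySem.Chars.isIn_eq_false_iff old s).mp h
  have hne : old ≠ [] := by
    rintro rfl; rw [PySem.Chars.isIn_nil] at h; simp at h
  unfold PySem.Chars.replace
  rw [if_neg (by simp [List.isEmpty_iff, hne]), replace_go_of_not_infix old new s [] hne hinf]
  simp

lemma str_replace_of_not_isIn (s old new : String) (h : PySem.Str.isIn old s = false) :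
    PySem.Str.replace s old new = s := by
  have : (PySem.Str.replace s old new).toList = s.toList := by
    rw [PySem.Str.toList_replace, chars_replace_of_not_isIn]
    rw [← PySem.Str.isIn_eq]; exact h
  have h2 := congrArg String.ofList this
  rwa [String.ofList_toList, String.ofList_toList] at h2

-- the running "longest so far" step B uses per word
def bestStep (mot : String) (best : Option String) (m : String) : Option String :=
  if PySem.Str.isIn m mot &&
     (match best with
      | none => true
      | some b => decide (PySem.Str.len b < PySem.Str.len m))
  then some m else best

-- head of the stable reverse-length insertion sort = running strict-max fold
lemma head?_foldl_insertBy (ms : List String) :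
    ∀ (acc : List String),
      (ms.foldl (fun acc x =>
        PySem.List.insertBy (fun a b => decide (PySem.Str.len b < PySem.Str.len a)) x acc) acc).head? =
      ms.foldl (fun best m =>
        match best with
        | none => some m
        | some b => if PySem.Str.len b < PySem.Str.len m then some m else some b) acc.head? := by
  induction ms with
  | nil => intro acc; rfl
  | cons m t ih =>
      intro acc
      rw [List.foldl_cons, List.foldl_cons, ih]
      congr 1
      cases acc with
      | nil => rfl
      | cons h rest =>
          simp only [PySem.List.insertBy, List.head?, PySem.Str.len_eq]
          by_cases hlt : h.length < m.length
          · simp [hlt]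
          · simp [hlt]

-- head of A's sorted match list = B's filtered strict-max fold
lemma head_sorted_eq_best (mot : String) (l : List String) :
    (PySem.List.sorted (l.filter (fun m => PySem.Str.isIn m mot)) (fun m => PySem.Str.len m) true).head? =
    l.foldl (bestStep mot) none := by
  rw [PySem.List.sorted_rev_eq_foldl_insertBy, head?_foldl_insertBy]
  have : ∀ (b : Option String),
      l.foldl (bestStep mot) b =
      (l.filter (fun m => PySem.Str.isIn m mot)).foldl (fun best m =>
        match best with
        | none => some m
        | some bb => if PySem.Str.len bb < PySem.Str.len m then some m else some bb) b := by
    induction l with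
    | nil => intro b; rfl
    | cons x t ih =>
        intro b
        have hx' : PySem.Chars.isIn x.toList mot.toList = PySem.Str.isIn x mot :=
          (PySem.Str.isIn_eq x mot).symm
        rcases hb : PySem.Str.isIn x mot with _ | _
        · rw [hb] at hx'
          rw [List.foldl_cons, ih]
          simp only [List.filter_cons, hb, Bool.false_eq_true, if_false]
          congr 1
          cases b <;> simp [bestStep, hx']
        · rw [hb] at hx'
          rw [List.foldl_cons, ih]
          simp only [List.filter_cons, hb, if_true, List.foldl_cons]
          congr 1
          cases b with
          | none => simp [bestStep, hx']
          | some bb =>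
              by_cases hlt : bb.length < x.length <;>
                simp [bestStep, PySem.Str.len_eq, hx', hlt]
  rw [this none]
  rfl

-- A's collection loop over the dict = filter of B's flattened abbreviation list
lemma collect_eq_filter (mot : String) (d : PySem.Dict String (List String))
    (hnd : d.keys.Nodup) :
    d.keys.foldl (fun acc lettre =>
      (d.getD lettre []).foldl (fun acc m =>
        if PySem.Str.isIn m mot then acc ++ [m] else acc) acc) [] =
    (d.values.flatMap (fun lst => lst)).filter (fun m => PySem.Str.isIn m mot) := by
  have hitems : d.keys.foldl (fun acc lettre =>
      (d.getD lettre []).foldl (fun acc m =>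
        if PySem.Str.isIn m mot then acc ++ [m] else acc) acc) [] =
      d.items.foldl (fun acc p =>
        p.2.foldl (fun acc m =>
          if PySem.Str.isIn m mot then acc ++ [m] else acc) acc) [] := by
    have hk : d.keys = d.items.map (·.1) := by simp only [PySem.Dict.keys]
    rw [hk, List.foldl_map]
    refine PySem.List.foldl_congr_mem _ _ _ _ ?_
    intro acc p hp
    rw [PySem.Dict.getD_of_mem_items d (by exact hp) hnd]
  rw [hitems]
  have hvals : d.values = d.items.map (·.2) := by simp only [PySem.Dict.values]
  rw [hvals]
  have : ∀ (acc : List String),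
      d.items.foldl (fun acc p =>
        p.2.foldl (fun acc m =>
          if PySem.Str.isIn m mot then acc ++ [m] else acc) acc) acc =
      acc ++ ((d.items.map (·.2)).flatMap (fun lst => lst)).filter (fun m => PySem.Str.isIn m mot) := by
    induction d.items with
    | nil => intro acc; simp
    | cons p t ih =>
        intro acc
        rw [List.foldl_cons]
        have := PySem.List.foldl_append_if (fun m => PySem.Str.isIn m mot) (fun m => m) p.2 acc
        simp only [List.map_id_fun', id] at this
        rw [show (p.2.foldl (fun acc m => if PySem.Str.isIn m mot then acc ++ [m] else acc) acc) =
              acc ++ (p.2.filter (fun m => PySem.Str.isIn m mot)).map (fun m => m) from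
                PySem.List.foldl_append_if _ _ _ _, ih]
        simp [List.filter_append]
  rw [this []]
  simp

-- per-word: A's sort-and-take-first marking = B's single-pass marking
lemma mark_eq (d : PySem.Dict String (List String)) (hnd : d.keys.Nodup) (mot : String) :
    (match contient_abbr mot d with
     | [] => mot
     | a :: _ => PySem.Str.replace mot a ("\\textabbrv{" ++ a ++ "}")) =
    (match (d.values.flatMap (fun lst => lst)).foldl (bestStep mot) none with
     | none => mot
     | some b => PySem.Str.replace mot b ("\\textabbrv{" ++ b ++ "}")) := by
  have hh : (contient_abbr mot d).head? =
      (d.values.flatMap (fun lst => lst)).foldl (bestStep mot) none := by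
    unfold contient_abbr
    rw [collect_eq_filter mot d hnd, head_sorted_eq_best]
  cases hs : contient_abbr mot d with
  | nil => rw [hs] at hh; simp only [List.head?] at hh; rw [← hh]
  | cons a t => rw [hs] at hh; simp only [List.head?] at hh; rw [← hh]

-- ===== VERDICT (by name: the statement is the Claim_ definition above) =====
theorem ajoute_abbr_latex_spec : Claim_equal_ajoute_abbr_latex := by
  intro chaine DATA _
  unfold Spec_ajoute_abbr_latex ajoute_abbr_latex ajoute_abbr_latex_alt
  simp only []
  have hnd := PySem.Dict.nodup_keys_ofList (κ := String) (ν := List String) DATA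
  have hmap : ((PySem.Str.split? chaine " ").getD []).map (fun mot =>
      match contient_abbr mot (PySem.Dict.ofList DATA) with
      | [] => mot
      | a :: _ => PySem.Str.replace mot a ("\\textabbrv{" ++ a ++ "}")) =
      ((PySem.Str.split? chaine " ").getD []).map (fun mot =>
        match (((PySem.Dict.ofList DATA).values).flatMap (fun lst => lst)).foldl (fun best m =>
            if PySem.Str.isIn m mot &&
               (match best with
                | none => true
                | some b => decide (PySem.Str.len b < PySem.Str.len m))
            then some m else best) none with
        | none => mot
        | some b => PySem.Str.replace mot b ("\\textabbrv{" ++ b ++ "}")) :=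
    List.map_congr_left (fun mot _ => mark_eq (PySem.Dict.ofList DATA) hnd mot)
  rw [hmap]
  by_cases hip : PySem.Str.isIn "/IP" (PySem.Str.join " "
      (((PySem.Str.split? chaine " ").getD []).map (fun mot =>
        match (((PySem.Dict.ofList DATA).values).flatMap (fun lst => lst)).foldl (fun best m =>
            if PySem.Str.isIn m mot &&
               (match best with
                | none => true
                | some b => decide (PySem.Str.len b < PySem.Str.len m))
            then some m else best) none with
        | none => mot
        | some b => PySem.Str.replace mot b ("\\textabbrv{" ++ b ++ "}"))))
  · rw [if_pos hip]
  · rw [if_neg hip,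
      str_replace_of_not_isIn _ _ _ (by simpa using hip)]
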